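-- pv_equiv track=rewrite | github.com/pangyouzhen/data-structure | contest/2461 maximumSubarraySum.py | maximumSubarraySum2
-- ===== SOURCE A (Python) =====
-- from typing import List
--
-- def maximumSubarraySum2(nums: List[int], k: int) -> int:
--     l = len(nums)
--     max_val = 0
--     for i in range(l - k + 1):
--         x = nums[i:i + k]
--         if len(x) == len(set(x)):
--             s = sum(x)
--             if s > max_val:
--                 max_val = s
--     return max_val
-- ===== SOURCE B (Python) =====
-- def maximumSubarraySum2(nums, k):
--     # Sliding window: running window sum, last-occurrence index per value and
--     # the start of the longest duplicate-free suffix; one pass, O(len(nums)).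
--     l = len(nums)
--     if k > l:
--         return 0
--     best = 0
--     s = 0
--     lo = 0
--     last = {}
--     for i, v in enumerate(nums):
--         s += v
--         if i >= k:
--             s -= nums[i - k]
--         j = last.get(v, -1)
--         if j + 1 > lo:
--             lo = j + 1
--         last[v] = i
--         if i >= k - 1 and lo <= i - k + 1 and s > best:
--             best = s
--     return best
-- ===== Notes on version B (the rewrite author's own statement) =====
-- stated objective: faster
-- what changed: Replaces the per-start slice/set/sum rescans with one sliding-window pass keeping a running window sum, a last-occurrence map and the start of the longest duplicate-free suffix.
-- outside the precondition, e.g. on maximumSubarraySum2([1, 2, 3], -1): A returns 3, B raises IndexError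
import Mathlib
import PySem

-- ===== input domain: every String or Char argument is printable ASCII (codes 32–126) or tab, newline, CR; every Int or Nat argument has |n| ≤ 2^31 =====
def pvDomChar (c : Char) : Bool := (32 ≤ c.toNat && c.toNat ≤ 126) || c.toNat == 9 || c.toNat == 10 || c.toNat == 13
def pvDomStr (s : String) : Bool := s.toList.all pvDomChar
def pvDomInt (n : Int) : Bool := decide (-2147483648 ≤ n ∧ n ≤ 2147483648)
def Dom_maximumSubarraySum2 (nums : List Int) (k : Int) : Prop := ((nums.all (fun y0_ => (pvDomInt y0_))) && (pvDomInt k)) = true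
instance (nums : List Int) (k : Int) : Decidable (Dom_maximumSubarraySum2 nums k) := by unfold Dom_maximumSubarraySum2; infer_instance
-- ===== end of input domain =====

-- B: one O(n) sliding-window pass (running window sum, last-occurrence map, start of
-- the duplicate-free suffix) instead of A's per-start slice/set/sum rescans.

-- ===== PORT A =====
def maximumSubarraySum2 (nums : List Int) (k : Int) : Int :=
  let l : Int := nums.length
  (PySem.List.pyRange 0 (l - k + 1) 1).foldl
    (fun max_val i =>
      let x := PySem.List.slice nums (some i) (some (i + k))
      if x.length = (PySem.Set.ofList x).length then
        let s := x.sum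
        if s > max_val then s else max_val
      else max_val) 0

-- ===== PORT B =====
-- one loop step of Source B; the state is (best, s, lo, last)
def pvStepB (nums : List Int) (k : Int)
    (st : Int × Int × Int × PySem.Dict Int Int) (p : Int × Int) :
    Int × Int × Int × PySem.Dict Int Int :=
  let best := st.1
  let s := st.2.1
  let lo := st.2.2.1
  let last := st.2.2.2
  let i := p.1
  let v := p.2
  let s := s + v
  let s := if i ≥ k then s - PySem.List.pyGetD nums (i - k) 0 else s
  let j := last.getD v (-1)
  let lo := if j + 1 > lo then j + 1 else lo
  let last := last.insert v i
  let best := if i ≥ k - 1 ∧ lo ≤ i - k + 1 ∧ s > best then s else best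
  (best, s, lo, last)

def maximumSubarraySum2_alt (nums : List Int) (k : Int) : Int :=
  let l : Int := nums.length
  if k > l then 0
  else
    ((PySem.List.enumerate nums 0).foldl (pvStepB nums k)
      (0, 0, 0, PySem.Dict.empty)).1

-- ===== PRECONDITION & SPEC =====
-- Pre_ excludes negative k on a nonempty list: there A's slice nums[i:i+k] wraps around
-- (negative stop index) and A returns the max over those accidental wrapped slices,
-- while B's window indexing nums[i-k] raises IndexError.
def Pre_maximumSubarraySum2 (nums : List Int) (k : Int) : Prop := 0 ≤ k ∨ nums = []
instance (nums : List Int) (k : Int) : Decidable (Pre_maximumSubarraySum2 nums k) := by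
  unfold Pre_maximumSubarraySum2; infer_instance

def pvWitness_maximumSubarraySum2 : List Int × Int := ([1, 2, 1, 3], 3)

def Spec_maximumSubarraySum2 (nums : List Int) (k : Int) (out : Int) : Prop := out = maximumSubarraySum2_alt nums k
instance (nums : List Int) (k : Int) (out : Int) : Decidable (Spec_maximumSubarraySum2 nums k out) := by unfold Spec_maximumSubarraySum2; infer_instance

-- ===== CLAIM (what is proved, stated in full; the proofs are below) =====
def Claim_equal_maximumSubarraySum2 : Prop := ∀ (nums : List Int) (k : Int), Dom_maximumSubarraySum2 nums k → Pre_maximumSubarraySum2 nums k → Spec_maximumSubarraySum2 nums k (maximumSubarraySum2 nums k)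

-- ===== LEMMAS AND PROOFS =====

def pvLastIdx (p : List Int) (v : Int) : Option Nat :=
  match p with
  | [] => none
  | x :: xs =>
    match pvLastIdx xs v with
    | some j => some (j + 1)
    | none => if x = v then some 0 else none

def pvWin (nums : List Int) (K t : Nat) : List Int := (nums.drop t).take K

def pvAacc (nums : List Int) (K m : Nat) : Int :=
  (List.range m).foldl
    (fun acc t =>
      if (pvWin nums K t).Nodup then
        (if (pvWin nums K t).sum > acc then (pvWin nums K t).sum else acc)
      else acc) 0

def pvFold (nums : List Int) (k : Int) (n : Nat) : Int × Int × Int × PySem.Dict Int Int :=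
  (PySem.List.enumerate (nums.take n) 0).foldl (pvStepB nums k) (0, 0, 0, PySem.Dict.empty)


-- pvLastIdx facts
lemma pvLastIdx_append (p : List Int) (x v : Int) :
    pvLastIdx (p ++ [x]) v = if x = v then some p.length else pvLastIdx p v := by
  induction p with
  | nil => simp [pvLastIdx]
  | cons y ys ih =>
    simp only [List.cons_append, pvLastIdx, ih, List.length_cons]
    by_cases hxv : x = v
    · simp [hxv]
    · simp [hxv]

lemma pvLastIdx_none (p : List Int) (v : Int) (h : pvLastIdx p v = none) : v ∉ p := by
  induction p with
  | nil => simp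
  | cons y ys ih =>
    simp only [pvLastIdx] at h
    cases hys : pvLastIdx ys v with
    | some j => simp [hys] at h
    | none =>
      simp only [hys] at h
      split_ifs at h with hy
      simp only [List.mem_cons, not_or]
      exact ⟨fun hv => hy hv.symm, ih hys⟩

lemma pvLastIdx_lt (p : List Int) (v : Int) (j : Nat) (h : pvLastIdx p v = some j) : j < p.length := by
  induction p generalizing j with
  | nil => simp [pvLastIdx] at h
  | cons y ys ih =>
    simp only [pvLastIdx] at h
    cases hys : pvLastIdx ys v with
    | some j0 => simp only [hys, Option.some.injEq] at h; have := ih j0 hys; simp; omega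
    | none =>
      simp only [hys] at h
      split_ifs at h with hy
      simp only [Option.some.injEq] at h; simp; omega

lemma pvLastIdx_get (p : List Int) (v : Int) (j : Nat) (h : pvLastIdx p v = some j) : p[j]? = some v := by
  induction p generalizing j with
  | nil => simp [pvLastIdx] at h
  | cons y ys ih =>
    simp only [pvLastIdx] at h
    cases hys : pvLastIdx ys v with
    | some j0 =>
      simp only [hys, Option.some.injEq] at h
      subst h
      simpa using ih j0 hys
    | none =>
      simp only [hys] at h
      split_ifs at h with hy
      · simp only [Option.some.injEq] at h
        subst hy; simp [← h]

lemma pvLastIdx_last (p : List Int) (v : Int) (j : Nat) (h : pvLastIdx p v = some j) :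
    ∀ m, j < m → p[m]? ≠ some v := by
  induction p generalizing j with
  | nil => simp [pvLastIdx] at h
  | cons y ys ih =>
    simp only [pvLastIdx] at h
    intro m hm
    cases hys : pvLastIdx ys v with
    | some j0 =>
      simp only [hys, Option.some.injEq] at h
      subst h
      cases m with
      | zero => omega
      | succ m' => simpa using ih j0 hys m' (by omega)
    | none =>
      simp only [hys] at h
      split_ifs at h with hy
      simp only [Option.some.injEq] at h
      cases m with
      | zero => omega
      | succ m' =>
        intro hc
        simp only [List.getElem?_cons_succ] at hc
        exact pvLastIdx_none ys v hys (List.mem_of_getElem? hc)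

lemma pv_mem_drop_iff (l : List Int) (v : Int) (t : Nat) :
    v ∈ l.drop t ↔ ∃ m, t ≤ m ∧ l[m]? = some v := by
  constructor
  · intro h
    obtain ⟨i, hi, he⟩ := List.mem_iff_getElem.mp h
    refine ⟨t + i, by omega, ?_⟩
    rw [← List.getElem?_drop]
    simp [List.getElem?_eq_getElem hi, he]
  · rintro ⟨m, hm, he⟩
    have : (l.drop t)[m - t]? = some v := by
      rw [List.getElem?_drop]
      have : t + (m - t) = m := by omega
      rw [this]; exact he
    exact List.mem_of_getElem? this

lemma pv_nodup_drop_mono (l : List Int) {a b : Nat} (h : a ≤ b) (hn : (l.drop a).Nodup) :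
    (l.drop b).Nodup := by
  have : l.drop b = (l.drop a).drop (b - a) := by
    rw [List.drop_drop]; congr 1; omega
  rw [this]
  exact hn.sublist (List.drop_sublist _ _)

lemma pv_nodup_append_singleton (ys : List Int) (x : Int) :
    (ys ++ [x]).Nodup ↔ ys.Nodup ∧ x ∉ ys := by
  rw [(List.perm_append_singleton x ys).nodup_iff, List.nodup_cons]
  tauto

lemma pvOfList_sublist (xs : List Int) : List.Sublist (PySem.Set.ofList xs) xs := by
  induction xs with
  | nil => simp [PySem.Set.ofList_nil]
  | cons x xs ih =>
    rw [PySem.Set.ofList_cons]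
    refine List.Sublist.cons₂ x (List.Sublist.trans ?_ ih)
    simp [PySem.Set.discard]

lemma pvNodup_iff_set_len (x : List Int) :
    x.length = (PySem.Set.ofList x).length ↔ x.Nodup := by
  constructor
  · intro h
    have := (pvOfList_sublist x).eq_of_length h.symm
    rw [← this]
    exact PySem.Set.nodup_ofList x
  · intro h
    rw [PySem.Set.ofList_eq_self_of_nodup x h]

lemma pvStepB_eq (nums : List Int) (k : Int) (best s lo : Int) (last : PySem.Dict Int Int) (i v : Int) :
    pvStepB nums k (best, s, lo, last) (i, v) =
      ((if i ≥ k - 1 ∧ (if last.getD v (-1) + 1 > lo then last.getD v (-1) + 1 else lo) ≤ i - k + 1 ∧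
           (if i ≥ k then s + v - PySem.List.pyGetD nums (i - k) 0 else s + v) > best
        then (if i ≥ k then s + v - PySem.List.pyGetD nums (i - k) 0 else s + v) else best),
       (if i ≥ k then s + v - PySem.List.pyGetD nums (i - k) 0 else s + v),
       (if last.getD v (-1) + 1 > lo then last.getD v (-1) + 1 else lo),
       last.insert v i) := rfl

lemma pvFold_succ (nums : List Int) (k : Int) (n : Nat) (h : n < nums.length) :
    pvFold nums k (n + 1) = pvStepB nums k (pvFold nums k n) ((n : Int), nums[n]) := by
  unfold pvFold
  rw [List.take_add_one, List.getElem?_eq_getElem h]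
  have hlen : (nums.take n).length = n := by simp [List.length_take]; omega
  rw [Option.toList_some, PySem.List.enumerate_append, hlen, List.foldl_append]
  simp [PySem.List.enumerate_cons, PySem.List.enumerate_nil]

lemma pvAacc_succ (nums : List Int) (K m : Nat) :
    pvAacc nums K (m + 1) =
      (if (pvWin nums K m).Nodup then
        (if (pvWin nums K m).sum > pvAacc nums K m then (pvWin nums K m).sum else pvAacc nums K m)
      else pvAacc nums K m) := by
  simp [pvAacc, List.range_succ]

lemma pvFold_zero (nums : List Int) (k : Int) : pvFold nums k 0 = (0, 0, 0, PySem.Dict.empty) := rfl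


lemma pvInv (nums : List Int) (K : Nat) (hK : K ≤ nums.length) :
    ∀ n, n ≤ nums.length →
      (pvFold nums (K : Int) n).2.1 = ((nums.take n).drop (n - K)).sum ∧
      (∀ v, (pvFold nums (K : Int) n).2.2.2.get? v
          = (pvLastIdx (nums.take n) v).map (fun j => (j : Int))) ∧
      0 ≤ (pvFold nums (K : Int) n).2.2.1 ∧
      (pvFold nums (K : Int) n).2.2.1 ≤ (n : Int) ∧
      ((nums.take n).drop (pvFold nums (K : Int) n).2.2.1.toNat).Nodup ∧
      (∀ t : Nat, t < (pvFold nums (K : Int) n).2.2.1.toNat → ¬ ((nums.take n).drop t).Nodup) ∧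
      (pvFold nums (K : Int) n).1 = pvAacc nums K (n + 1 - K) := by
  intro n
  induction n with
  | zero =>
    intro _
    rw [pvFold_zero]
    refine ⟨by simp, by simp [pvLastIdx, PySem.Dict.get?_empty], by simp, by simp, by simp, by simp, ?_⟩
    rcases Nat.eq_zero_or_pos K with hK0 | hK1
    · subst hK0
      simp [pvAacc, pvWin, List.range_succ]
    · have : 0 + 1 - K = 0 := by omega
      rw [this]
      rfl
  | succ n ih =>
    intro hn1
    have hn : n < nums.length := by omega
    obtain ⟨hs, hlast, hlo0, hlon, hnd, hmin, hbest⟩ := ih (by omega)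
    rcases hF : pvFold nums (K : Int) n with ⟨best, s, lo, last⟩
    rw [hF] at hs hlast hlo0 hlon hnd hmin hbest
    simp only at hs hlast hlo0 hlon hnd hmin hbest
    set p := nums.take n with hp
    set x := nums[n] with hx
    have hplen : p.length = n := by simp [hp, List.length_take]; omega
    have hp' : nums.take (n + 1) = p ++ [x] := by
      rw [List.take_add_one, List.getElem?_eq_getElem hn]; rfl
    have hstep := pvFold_succ nums (K : Int) n hn
    rw [hF, pvStepB_eq, ← hx] at hstep
    set s' := (if (n : Int) ≥ (K : Int) then s + x - PySem.List.pyGetD nums ((n : Int) - (K : Int)) 0 else s + x) with hs'def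
    set j := last.getD x (-1) with hjdef
    set lo' := (if j + 1 > lo then j + 1 else lo) with hlo'def
    clear_value s' j lo'
    -- s invariant for n+1
    have hs' : s' = ((nums.take (n + 1)).drop (n + 1 - K)).sum := by
      rw [hp']
      by_cases hKn : K ≤ n
      · have hge : ((n : Int) ≥ (K : Int)) := by omega
        have hcast : (n : Int) - (K : Int) = ((n - K : Nat) : Int) := by omega
        have hidx : n - K < nums.length := by omega
        have hidx' : n - K < (p ++ [x]).length := by simp [hplen]
        have hget : PySem.List.pyGetD nums ((n : Int) - (K : Int)) 0 = nums[n - K] := by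
          rw [hcast, PySem.List.pyGetD_natCast, List.getD_eq_getElem nums 0 hidx]
        have hsucc : n + 1 - K = (n - K) + 1 := by omega
        rw [hs'def, if_pos hge, hget, hsucc]
        have hcons : (p ++ [x]).drop (n - K) = (p ++ [x])[n - K] :: (p ++ [x]).drop ((n - K) + 1) :=
          List.drop_eq_getElem_cons hidx'
        have hdropapp : (p ++ [x]).drop (n - K) = p.drop (n - K) ++ [x] :=
          List.drop_append_of_le_length (by omega)
        have hsum1 : ((p ++ [x]).drop (n - K)).sum = s + x := by
          rw [hdropapp, List.sum_append, ← hs]; simp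
        have hel : (p ++ [x])[n - K]'hidx' = nums[n - K] := by
          have h2 : n - K < (nums.take (n + 1)).length := by simp [List.length_take]; omega
          rw [← List.getElem_of_eq hp' h2]
          exact List.getElem_take
        have hq := congrArg List.sum hcons
        rw [List.sum_cons, hel, hsum1] at hq
        omega
      · have hge : ¬ ((n : Int) ≥ (K : Int)) := by omega
        have h0 : n + 1 - K = 0 := by omega
        have h0' : n - K = 0 := by omega
        rw [hs'def, if_neg hge, h0]
        rw [h0'] at hs
        simp only [List.drop_zero] at hs ⊢
        rw [List.sum_append, ← hs]; simp
    -- last invariant for n+1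
    have hlast' : ∀ v, (last.insert x (n : Int)).get? v
        = (pvLastIdx (nums.take (n + 1)) v).map (fun j => (j : Int)) := by
      intro v
      rw [hp', pvLastIdx_append, PySem.Dict.get?_insert]
      by_cases hvx : v = x
      · subst hvx
        simp [hplen]
      · have hxv : ¬ (x = v) := fun h => hvx h.symm
        simp [hvx, hxv, hlast v]
    -- j characterization
    have hj : j = ((pvLastIdx p x).map (fun j => (j : Int))).getD (-1) := by
      rw [hjdef, PySem.Dict.getD_eq_get?_getD, hlast x]
    -- bounds for lo'
    have hlo'0 : 0 ≤ lo' := by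
      rw [hlo'def]; split_ifs <;> omega
    have hlo'lo : lo ≤ lo' := by
      rw [hlo'def]; split_ifs <;> omega
    have hlo'n : lo' ≤ ((n : Int) + 1) := by
      rw [hlo'def]
      cases hL : pvLastIdx p x with
      | none =>
        have hjval : j = -1 := by rw [hj, hL]; simp
        split_ifs <;> omega
      | some j0 =>
        have hjval : j = (j0 : Int) := by rw [hj, hL]; simp
        have hj0 := pvLastIdx_lt p x j0 hL
        rw [hplen] at hj0
        split_ifs <;> omega
    have hlo'n2 : lo' ≤ (n : Int) := by
      rw [hlo'def]
      cases hL : pvLastIdx p x with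
      | none =>
        have hjval : j = -1 := by rw [hj, hL]; simp
        split_ifs <;> omega
      | some j0 =>
        have hjval : j = (j0 : Int) := by rw [hj, hL]; simp
        have hj0 := pvLastIdx_lt p x j0 hL
        rw [hplen] at hj0
        split_ifs <;> omega
    -- x does not occur in p at or beyond lo'
    have hxnotin : x ∉ p.drop lo'.toNat := by
      intro hmem
      obtain ⟨m, hm, hme⟩ := (pv_mem_drop_iff p x lo'.toNat).mp hmem
      cases hL : pvLastIdx p x with
      | none => exact pvLastIdx_none p x hL (List.mem_of_getElem? hme)
      | some j0 =>
        have hjval : j = (j0 : Int) := by rw [hj, hL]; simp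
        have hlo'j : (j0 : Int) + 1 ≤ lo' := by
          rw [hlo'def, hjval]; split_ifs <;> omega
        have hmj : j0 < m := by omega
        exact pvLastIdx_last p x j0 hL m hmj hme
    -- Nodup for n+1
    have hnd' : ((nums.take (n + 1)).drop lo'.toNat).Nodup := by
      rw [hp', List.drop_append_of_le_length (by omega : lo'.toNat ≤ p.length)]
      rw [pv_nodup_append_singleton]
      exact ⟨pv_nodup_drop_mono p (by omega : lo.toNat ≤ lo'.toNat) hnd, hxnotin⟩
    -- minimality for n+1
    have hmin' : ∀ t : Nat, t < lo'.toNat → ¬ ((nums.take (n + 1)).drop t).Nodup := by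
      intro t ht
      have htn : t ≤ p.length := by omega
      rw [hp', List.drop_append_of_le_length htn, pv_nodup_append_singleton]
      by_cases hlt : t < lo.toNat
      · intro hc
        exact hmin t hlt hc.1
      · cases hL : pvLastIdx p x with
        | none =>
          exfalso
          have hjval : j = -1 := by rw [hj, hL]; simp
          have hll : lo' = lo := by rw [hlo'def, hjval]; split_ifs <;> omega
          rw [hll] at ht
          exact hlt ht
        | some j0 =>
          have hjval : j = (j0 : Int) := by rw [hj, hL]; simp
          have htj : t ≤ j0 := by
            have : lo' ≤ (j0 : Int) + 1 := by rw [hlo'def, hjval]; split_ifs <;> omega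
            omega
          have hxin : x ∈ p.drop t :=
            (pv_mem_drop_iff p x t).mpr ⟨j0, htj, pvLastIdx_get p x j0 hL⟩
          intro hc
          exact hc.2 hxin
    -- best invariant for n+1
    have hbest' :
        (if (n : Int) ≥ (K : Int) - 1 ∧ lo' ≤ (n : Int) - (K : Int) + 1 ∧ s' > best then s' else best)
          = pvAacc nums K (n + 1 + 1 - K) := by
      by_cases hKn1 : K ≤ n + 1
      · set t0 := n + 1 - K with ht0
        have h1 : (n : Int) ≥ (K : Int) - 1 := by omega
        have h2 : (n : Int) - (K : Int) + 1 = (t0 : Int) := by omega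
        have ht0succ : n + 1 + 1 - K = t0 + 1 := by omega
        have hwin : pvWin nums K t0 = (nums.take (n + 1)).drop t0 := by
          rw [pvWin, List.drop_take]
          congr 1
          omega
        have hsum : s' = (pvWin nums K t0).sum := by rw [hwin, hs']
        have hiff : (pvWin nums K t0).Nodup ↔ lo' ≤ (t0 : Int) := by
          constructor
          · intro hndw
            by_contra hle
            have htlt : t0 < lo'.toNat := by omega
            exact hmin' t0 htlt (hwin ▸ hndw)
          · intro hle
            rw [hwin]
            exact pv_nodup_drop_mono _ (by omega : lo'.toNat ≤ t0) hnd'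
        rw [ht0succ, pvAacc_succ, ← hbest, h2]
        by_cases hndw : (pvWin nums K t0).Nodup
        · have hle : lo' ≤ (t0 : Int) := hiff.mp hndw
          rw [if_pos hndw]
          by_cases hsb : s' > best
          · rw [if_pos ⟨h1, hle, hsb⟩, if_pos (by rw [← hsum]; exact hsb), hsum]
          · rw [if_neg (by tauto), if_neg (by rw [← hsum]; exact hsb)]
        · have hnle : ¬ (lo' ≤ (t0 : Int)) := fun h => hndw (hiff.mpr h)
          rw [if_neg hndw, if_neg (by tauto)]
      · have h1 : ¬ ((n : Int) ≥ (K : Int) - 1) := by omega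
        rw [if_neg (by tauto)]
        have e1 : n + 1 - K = 0 := by omega
        have e2 : n + 1 + 1 - K = 0 := by omega
        rw [hbest, e1, e2]
    rw [hstep]
    exact ⟨hs', hlast', hlo'0, hlo'n, hnd', hmin', hbest'⟩

lemma pvA_eq (nums : List Int) (K : Nat) (hKL : K ≤ nums.length) :
    maximumSubarraySum2 nums (K : Int) = pvAacc nums K (nums.length - K + 1) := by
  simp only [maximumSubarraySum2]
  rw [PySem.List.pyRange_one, List.foldl_map]
  have hM : (((nums.length : Int) - (K : Int) + 1) - 0).toNat = nums.length - K + 1 := by omega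
  rw [hM, pvAacc]
  congr 1
  funext acc t
  have hsl : PySem.List.slice nums (some ((0 : Int) + (t : Int))) (some ((0 : Int) + (t : Int) + (K : Int)))
      = pvWin nums K t := by
    rw [zero_add, PySem.List.slice_natCast_add]; rfl
  simp only [hsl]
  rw [if_congr (pvNodup_iff_set_len (pvWin nums K t)) rfl rfl]

lemma pv_foldl_zero {α : Type} (l : List α) (f : Int → α → Int) (h : ∀ i, f 0 i = 0) :
    l.foldl f 0 = 0 := by
  induction l with
  | nil => rfl
  | cons a l ih => rw [List.foldl_cons, h a]; exact ih

lemma pvA_nil (k : Int) : maximumSubarraySum2 [] k = 0 := by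
  simp only [maximumSubarraySum2]
  apply pv_foldl_zero
  intro i
  simp [PySem.List.slice]

lemma pvMain (nums : List Int) (k : Int) (hpre : 0 ≤ k ∨ nums = []) :
    maximumSubarraySum2 nums k = maximumSubarraySum2_alt nums k := by
  by_cases hk0 : 0 ≤ k
  · by_cases hkl : k ≤ (nums.length : Int)
    · set K := k.toNat with hKdef
      have hkK : k = (K : Int) := (Int.toNat_of_nonneg hk0).symm
      have hKL : K ≤ nums.length := by omega
      have hinv := (pvInv nums K hKL nums.length (le_refl _)).2.2.2.2.2.2
      have hfold : pvFold nums (K : Int) nums.length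
          = (PySem.List.enumerate nums 0).foldl (pvStepB nums (K : Int)) (0, 0, 0, PySem.Dict.empty) := by
        rw [pvFold, List.take_length]
      have hA : maximumSubarraySum2 nums k = pvAacc nums K (nums.length - K + 1) := by
        rw [hkK]; exact pvA_eq nums K hKL
      have hB : maximumSubarraySum2_alt nums k = pvAacc nums K (nums.length + 1 - K) := by
        simp only [maximumSubarraySum2_alt]
        rw [if_neg (by omega : ¬ (k > (nums.length : Int))), hkK, ← hfold, hinv]
      rw [hA, hB]
      congr 1
      omega
    · have hA : maximumSubarraySum2 nums k = 0 := by
        simp only [maximumSubarraySum2]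
        rw [PySem.List.pyRange_one_eq_nil (by omega : (nums.length : Int) - k + 1 ≤ 0)]
        rfl
      have hB : maximumSubarraySum2_alt nums k = 0 := by
        simp only [maximumSubarraySum2_alt]
        rw [if_pos (by omega)]
      rw [hA, hB]
  · have hnil : nums = [] := hpre.resolve_left hk0
    subst hnil
    rw [pvA_nil]
    simp only [maximumSubarraySum2_alt]
    rw [if_neg (by simp; omega)]
    rfl

-- ===== VERDICT (by name: the statement is the Claim_ definition above) =====
theorem maximumSubarraySum2_spec : Claim_equal_maximumSubarraySum2 := by
  intro nums k _ hpre
  unfold Spec_maximumSubarraySum2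
  exact pvMain nums k hpre
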